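-- pv_equiv track=rewrite | github.com/ssemenova/Genetic-Poker | hand.py | checkLegality
-- ===== SOURCE A (Python) =====
-- def checkLegality( oldHand ):
--     # print oldHand
--     # print 'stuck'
--     newHand = []
--     for card in oldHand:
--         if card in newHand:
--             return False
--         else:
--             newHand.append(card)
--     return True
-- ===== SOURCE B (Python) =====
-- def checkLegality(oldHand):
--     return len(oldHand) == len(set(oldHand))
-- ===== Notes on version B (the rewrite author's own statement) =====
-- stated objective: idiomatic
-- what changed: Replaces A's incremental scan with early return over a growing membership list by building set(oldHand) once and comparing its size to the list length.
import Mathlib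
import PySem

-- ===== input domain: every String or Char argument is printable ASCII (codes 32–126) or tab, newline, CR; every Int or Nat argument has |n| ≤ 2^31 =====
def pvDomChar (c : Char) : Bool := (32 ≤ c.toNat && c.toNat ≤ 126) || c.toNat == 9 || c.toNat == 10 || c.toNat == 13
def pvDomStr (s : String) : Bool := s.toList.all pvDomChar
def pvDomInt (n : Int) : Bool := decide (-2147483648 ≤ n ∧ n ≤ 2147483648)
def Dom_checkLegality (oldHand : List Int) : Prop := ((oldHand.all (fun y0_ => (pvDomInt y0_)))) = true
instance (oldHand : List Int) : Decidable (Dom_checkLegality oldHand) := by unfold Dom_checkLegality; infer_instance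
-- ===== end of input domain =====

-- ===== PORT A =====
def checkLegalityGo (newHand : List Int) (cards : List Int) : Bool :=
  match cards with
  | [] => true
  | card :: rest =>
    if newHand.contains card then false
    else checkLegalityGo (newHand ++ [card]) rest

def checkLegality (oldHand : List Int) : Bool := checkLegalityGo [] oldHand

-- ===== PORT B =====
def checkLegality_alt (oldHand : List Int) : Bool :=
  oldHand.length == (PySem.Set.ofList oldHand).length

-- ===== PRECONDITION & SPEC =====
def Spec_checkLegality (oldHand : List Int) (out : Bool) : Prop := out = checkLegality_alt oldHand
instance (oldHand : List Int) (out : Bool) : Decidable (Spec_checkLegality oldHand out) := by unfold Spec_checkLegality; infer_instance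

-- ===== CLAIM (what is proved, stated in full; the proofs are below) =====
def Claim_equal_checkLegality : Prop := ∀ (oldHand : List Int), Dom_checkLegality oldHand → Spec_checkLegality oldHand (checkLegality oldHand)

-- B: compare the hand length with the size of the set of its cards (idiomatic no-duplicates test); return value only.
-- ===== LEMMAS AND PROOFS =====

-- ===== VERDICT (by name: the statement is the Claim_ definition above) =====
-- size bound used in the duplicate branch
theorem update_length_le (cards s : List Int) :
    (PySem.Set.update s cards).length ≤ s.length + cards.length := by
  induction cards generalizing s with
  | nil => simp [PySem.Set.update]
  | cons d tl ih =>
    have h1 : (PySem.Set.add s d).length ≤ s.length + 1 := by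
      simp only [PySem.Set.add, List.contains_iff_mem]
      split_ifs <;> simp
    have h2 := ih (PySem.Set.add s d)
    simp only [PySem.Set.update, List.foldl_cons] at *
    simp only [List.length_cons]
    omega

-- A's loop characterised: with a duplicate-free accumulator s, A's scan returns true
-- iff extending the set s by cards keeps every card new — i.e. the set-size equation B uses.
theorem checkLegalityGo_eq (cards s : List Int) (hs : s.Nodup) :
    checkLegalityGo s cards
      = ((s.length + cards.length) == (PySem.Set.update s cards).length) := by
  induction cards generalizing s with
  | nil =>
    simp [checkLegalityGo, PySem.Set.update]
  | cons c rest ih =>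
    simp only [checkLegalityGo]
    by_cases hc : c ∈ s
    · have hadd : PySem.Set.add s c = s := by simp [PySem.Set.add, hc]
      have hlen := update_length_le rest s
      have : ((s.length + (c :: rest).length) == (PySem.Set.update s (c :: rest)).length) = false := by
        simp only [PySem.Set.update, List.foldl_cons, hadd]
        simp only [beq_eq_false_iff_ne, ne_eq, List.length_cons]
        have := update_length_le rest s
        simp only [PySem.Set.update] at this
        omega
      simp only [List.contains_iff_mem, hc, if_pos]
      exact (by simpa using this.symm)
    · have hadd : PySem.Set.add s c = s ++ [c] := by simp [PySem.Set.add, List.contains_iff_mem, hc]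
      have hnd : (s ++ [c]).Nodup := by
        simp only [List.nodup_append, List.nodup_singleton, true_and, hs]
        intro a ha b hb hab
        simp only [List.mem_singleton] at hb
        subst hb; subst hab; exact hc ha
      have := ih (s ++ [c]) hnd
      simp only [PySem.Set.update, List.foldl_cons] at *
      rw [hadd]
      simp [List.contains_iff_mem, hc, this]
      constructor <;> intro h <;> omega

theorem checkLegality_spec : Claim_equal_checkLegality := by
  intro oldHand _
  unfold Spec_checkLegality
  unfold checkLegality checkLegality_alt
  rw [checkLegalityGo_eq oldHand [] List.nodup_nil]
  have : PySem.Set.update [] oldHand = PySem.Set.ofList oldHand := by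
    simp [PySem.Set.update, PySem.Set.ofList_eq_foldl]
  rw [this]
  simp
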